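-- pv_equiv track=rewrite | github.com/LiamMZ/vlm-semantic-spatial-perception | src/planning/layered_domain_generator.py | _parse_pddl_param_string
-- ===== SOURCE A (Python) =====
-- from typing import Any, Callable, Dict, List, Optional, Set, Tuple
--
-- def _parse_pddl_param_string(params: str) -> List[str]:
--     """
--     Convert a raw PDDL parameter string to a list of ``?var - type`` tokens.
--
--     e.g. ``"(?obj - object ?from - surface ?to - surface)"``
--          → ``["?obj - object", "?from - surface", "?to - surface"]``
--     """
--     # Strip outer parens if present
--     s = params.strip().lstrip("(").rstrip(")")
--     # Split on whitespace; reassemble "?var - type" triples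
--     tokens = s.split()
--     result: List[str] = []
--     i = 0
--     while i < len(tokens):
--         tok = tokens[i]
--         if tok.startswith("?"):
--             if i + 2 < len(tokens) and tokens[i + 1] == "-":
--                 result.append(f"{tok} - {tokens[i + 2]}")
--                 i += 3
--             else:
--                 result.append(tok)
--                 i += 1
--         else:
--             i += 1
--     return result
-- ===== SOURCE B (Python) =====
-- from typing import List
--
--
-- def _parse_pddl_param_string(params: str) -> List[str]:
--     """One-pass streaming parser: a tiny state machine over the tokens
--     (pending variable + seen-dash flag) instead of an index loop with lookahead."""
--     s = params.strip().lstrip("(").rstrip(")")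
--     result: List[str] = []
--     var = None      # pending "?var" waiting for a possible " - type"
--     dash = False    # a lone "-" was seen right after the pending var
--     for tok in s.split():
--         if dash:
--             result.append(f"{var} - {tok}")
--             var, dash = None, False
--         elif var is not None and tok == "-":
--             dash = True
--         else:
--             if var is not None:
--                 result.append(var)
--             var = tok if tok.startswith("?") else None
--     if var is not None:
--         result.append(var)
--     return result
-- ===== Notes on version B (the rewrite author's own statement) =====
-- stated objective: alternative
-- what changed: Replaced A's index-based while loop with two-token lookahead (i, tokens[i+1], tokens[i+2], i += 3) by a single streaming pass over the tokens carrying a pending-variable/seen-dash state machine with a final flush; no index arithmetic or lookahead remains.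
import Mathlib
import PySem

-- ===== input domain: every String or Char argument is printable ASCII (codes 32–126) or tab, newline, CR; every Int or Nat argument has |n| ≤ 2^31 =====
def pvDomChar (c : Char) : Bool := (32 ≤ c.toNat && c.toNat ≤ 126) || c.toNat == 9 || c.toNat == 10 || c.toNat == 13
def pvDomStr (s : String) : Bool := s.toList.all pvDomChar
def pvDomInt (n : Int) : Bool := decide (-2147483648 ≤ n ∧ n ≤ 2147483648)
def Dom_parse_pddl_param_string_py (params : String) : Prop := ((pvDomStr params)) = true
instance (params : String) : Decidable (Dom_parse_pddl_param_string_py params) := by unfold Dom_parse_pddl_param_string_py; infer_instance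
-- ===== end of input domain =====

-- B replaces A's index/lookahead while-loop by a one-pass fold carrying a pending-variable/dash
-- state machine (alternative decomposition, same O(n) cost); return values proved equal on all inputs.

-- shared preprocessing: both Pythons have the identical line
--   s = params.strip().lstrip("(").rstrip(")");  tokens = s.split()
-- str.lstrip("(") / rstrip(")") with a ONE-char strip set are exactly dropWhile of that char
-- (hand port, exact: lstrip(cs) drops leading chars in cs; here cs = "(" resp. ")").
def pvLStripParen (s : String) : String := String.ofList (s.toList.dropWhile (· == '('))
def pvRStripParen (s : String) : String := String.ofList ((s.toList.reverse.dropWhile (· == ')')).reverse)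
def pvTokens (params : String) : List String :=
  PySem.Str.split₀ (pvRStripParen (pvLStripParen (PySem.Str.strip params)))

-- ===== PORT A =====
-- literal port of A's while-loop: index i, lookahead tokens[i+1], tokens[i+2] (guarded, getD)
def pvLoopA (tokens : List String) (result : List String) (i : Nat) : List String :=
  if i < tokens.length then
    let tok := tokens.getD i ""
    if PySem.Str.startswith tok "?" then
      if i + 2 < tokens.length ∧ tokens.getD (i + 1) "" = "-" then
        pvLoopA tokens (result ++ [tok ++ " - " ++ tokens.getD (i + 2) ""]) (i + 3)
      else
        pvLoopA tokens (result ++ [tok]) (i + 1)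
    else
      pvLoopA tokens result (i + 1)
  else result
termination_by tokens.length - i

def parse_pddl_param_string_py (params : String) : List String :=
  pvLoopA (pvTokens params) [] 0

-- ===== PORT B =====
-- literal port of Source B's loop body: state = (result, pending var, dash flag)
-- (when dash = true the Python invariantly has var set; var.getD "" reads that value)
def pvStepB (st : List String × Option String × Bool) (tok : String) :
    List String × Option String × Bool :=
  match st with
  | (result, var, dash) =>
    if dash then
      (result ++ [var.getD "" ++ " - " ++ tok], none, false)
    else if var.isSome ∧ tok = "-" then
      (result, var, true)
    else
      let result' := match var with | some v => result ++ [v] | none => result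
      (result', if PySem.Str.startswith tok "?" then some tok else none, false)

def parse_pddl_param_string_py_alt (params : String) : List String :=
  match (pvTokens params).foldl pvStepB ([], none, false) with
  | (result, some v, _) => result ++ [v]
  | (result, none, _) => result

-- ===== PRECONDITION & SPEC =====
def Spec_parse_pddl_param_string_py (params : String) (out : List String) : Prop := out = parse_pddl_param_string_py_alt params
instance (params : String) (out : List String) : Decidable (Spec_parse_pddl_param_string_py params out) := by unfold Spec_parse_pddl_param_string_py; infer_instance

-- ===== CLAIM (what is proved, stated in full; the proofs are below) =====
def Claim_equal_parse_pddl_param_string_py : Prop := ∀ (params : String), Dom_parse_pddl_param_string_py params → Spec_parse_pddl_param_string_py params (parse_pddl_param_string_py params)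

-- ===== LEMMAS AND PROOFS =====

-- canonical token-level recursion both ports are reduced to
def pvGoA : List String → List String
  | [] => []
  | t :: d :: ty :: rest' =>
    if PySem.Str.startswith t "?" then
      if d = "-" then (t ++ " - " ++ ty) :: pvGoA rest' else t :: pvGoA (d :: ty :: rest')
    else pvGoA (d :: ty :: rest')
  | t :: rest =>
    if PySem.Str.startswith t "?" then t :: pvGoA rest else pvGoA rest

-- unfolding facts about pvGoA (hypotheses in the Chars form simp normalizes to)
theorem pvGoA_cons_neg (t : String) (rest : List String)
    (h : PySem.Chars.startswith t.toList ['?'] = false) : pvGoA (t :: rest) = pvGoA rest := by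
  match rest with
  | [] => simp [pvGoA, h]
  | [d] => simp [pvGoA, h]
  | d :: ty :: r => simp [pvGoA, h]

theorem pvGoA_cons_cons_ne (v t : String) (rest : List String)
    (hv : PySem.Chars.startswith v.toList ['?'] = true) (ht : t ≠ "-") :
    pvGoA (v :: t :: rest) = v :: pvGoA (t :: rest) := by
  match rest with
  | [] => simp [pvGoA, hv]
  | ty :: r => simp [pvGoA, hv, ht]

theorem pvGoA_cons_of_not_pair (t : String) (rest : List String)
    (hq : PySem.Chars.startswith t.toList ['?'] = true)
    (h : ∀ ty r', rest ≠ "-" :: ty :: r') : pvGoA (t :: rest) = t :: pvGoA rest := by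
  match rest with
  | [] => simp [pvGoA, hq]
  | [d] => simp [pvGoA, hq]
  | d :: ty :: r =>
    have hd : d ≠ "-" := by intro he; exact h ty r (by rw [he])
    simp [pvGoA, hq, hd]

theorem pvLoopA_eq_goA (tokens : List String) :
    ∀ i result, pvLoopA tokens result i = result ++ pvGoA (tokens.drop i) := by
  have key : ∀ n i result, tokens.length - i ≤ n →
      pvLoopA tokens result i = result ++ pvGoA (tokens.drop i) := by
    intro n
    induction n with
    | zero =>
      intro i result hle
      have hge : tokens.length ≤ i := by omega
      rw [pvLoopA]
      simp [Nat.not_lt.mpr hge, List.drop_of_length_le hge, pvGoA]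
    | succ n ih =>
      intro i result hle
      rw [pvLoopA]
      by_cases hi : i < tokens.length
      · simp only [if_pos hi]
        have hdi : tokens.drop i = tokens[i] :: tokens.drop (i + 1) :=
          List.drop_eq_getElem_cons hi
        have hgd : tokens.getD i "" = tokens[i] := List.getD_eq_getElem tokens "" hi
        by_cases hq : PySem.Str.startswith (tokens.getD i "") "?"
        · simp only [if_pos hq]
          have hq' : PySem.Chars.startswith tokens[i].toList ['?'] = true := by
            rw [hgd] at hq; simpa using hq
          by_cases hc : i + 2 < tokens.length ∧ tokens.getD (i + 1) "" = "-"
          · obtain ⟨hlen, hdash⟩ := hc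
            have h1 : i + 1 < tokens.length := by omega
            have hd1 : tokens.drop (i + 1) = tokens[i + 1] :: tokens.drop (i + 2) :=
              List.drop_eq_getElem_cons h1
            have hd2 : tokens.drop (i + 2) = tokens[i + 2] :: tokens.drop (i + 3) :=
              List.drop_eq_getElem_cons hlen
            have hgd1 : tokens[i + 1] = "-" := by
              rw [← List.getD_eq_getElem tokens "" h1]; exact hdash
            have hgd2 : tokens.getD (i + 2) "" = tokens[i + 2] := List.getD_eq_getElem tokens "" hlen
            rw [if_pos ⟨hlen, hdash⟩, ih (i + 3) _ (by omega), hgd, hgd2, hdi, hd1, hd2, hgd1]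
            simp [pvGoA, hq']
          · rw [if_neg hc, ih (i + 1) _ (by omega), hdi]
            have hnp : ∀ ty r', tokens.drop (i + 1) ≠ "-" :: ty :: r' := by
              intro ty r' he
              apply hc
              have h1 : i + 1 < tokens.length := by
                by_contra hn
                rw [List.drop_of_length_le (by omega)] at he
                simp at he
              have hd1 : tokens.drop (i + 1) = tokens[i + 1] :: tokens.drop (i + 2) :=
                List.drop_eq_getElem_cons h1
              rw [hd1] at he
              injection he with he1 he2
              have hlen2 : i + 2 < tokens.length := by
                by_contra hn
                rw [List.drop_of_length_le (by omega)] at he2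
                simp at he2
              exact ⟨hlen2, by rw [List.getD_eq_getElem tokens "" h1, he1]⟩
            rw [pvGoA_cons_of_not_pair _ _ hq' hnp, hgd]
            simp
        · simp only [if_neg hq]
          rw [ih (i + 1) _ (by omega), hdi]
          have hq' : PySem.Chars.startswith tokens[i].toList ['?'] = false := by
            rw [hgd] at hq
            simpa using fun h => hq h
          rw [pvGoA_cons_neg _ _ hq']
      · rw [if_neg hi]
        rw [List.drop_of_length_le (by omega), pvGoA]
        simp
  intro i result
  exact key (tokens.length - i) i result le_rfl

def pvFinB (st : List String × Option String × Bool) : List String :=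
  match st with
  | (result, some v, _) => result ++ [v]
  | (result, none, _) => result

theorem pvFoldB_eq_goA (ts : List String) :
    ∀ result,
      pvFinB (ts.foldl pvStepB (result, none, false)) = result ++ pvGoA ts
      ∧ (∀ v, PySem.Chars.startswith v.toList ['?'] = true →
          pvFinB (ts.foldl pvStepB (result, some v, false)) = result ++ pvGoA (v :: ts))
      ∧ (∀ v, PySem.Chars.startswith v.toList ['?'] = true →
          pvFinB (ts.foldl pvStepB (result, some v, true)) = result ++ pvGoA (v :: "-" :: ts)) := by
  induction ts with
  | nil =>
    intro result
    have hm : PySem.Chars.startswith ['-'] ['?'] = false := by decide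
    refine ⟨by simp [pvFinB, pvGoA], ?_, ?_⟩
    · intro v hv
      simp [pvFinB, pvGoA, hv]
    · intro v hv
      simp [pvFinB, pvGoA, hv, hm]
  | cons t rest ih =>
    intro result
    refine ⟨?_, ?_, ?_⟩
    · -- state (result, none, false)
      by_cases ht : PySem.Chars.startswith t.toList ['?'] = true
      · have h2 := (ih result).2.1 t ht
        simp only [List.foldl_cons]
        simpa [pvStepB, ht] using h2
      · have h2 := (ih result).1
        simp only [Bool.not_eq_true] at ht
        rw [← pvGoA_cons_neg t rest ht] at h2
        simp only [List.foldl_cons]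
        simpa [pvStepB, ht] using h2
    · -- state (result, some v, false)
      intro v hv
      simp only [List.foldl_cons]
      by_cases htd : t = "-"
      · subst htd
        simpa [pvStepB] using (ih result).2.2 v hv
      · by_cases ht : PySem.Chars.startswith t.toList ['?'] = true
        · have h2 := (ih (result ++ [v])).2.1 t ht
          rw [pvGoA_cons_cons_ne v t rest hv htd]
          simpa [pvStepB, htd, ht] using h2
        · have h2 := (ih (result ++ [v])).1
          simp only [Bool.not_eq_true] at ht
          rw [pvGoA_cons_cons_ne v t rest hv htd, pvGoA_cons_neg t rest ht]
          simpa [pvStepB, htd, ht] using h2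
    · -- state (result, some v, true)
      intro v hv
      simp only [List.foldl_cons]
      have h2 := (ih (result ++ [v ++ " - " ++ t])).1
      simpa [pvStepB, pvGoA, hv] using h2

-- ===== VERDICT (by name: the statement is the Claim_ definition above) =====
theorem parse_pddl_param_string_py_spec : Claim_equal_parse_pddl_param_string_py := by
  intro params _
  unfold Spec_parse_pddl_param_string_py parse_pddl_param_string_py parse_pddl_param_string_py_alt
  rw [pvLoopA_eq_goA]
  have h := (pvFoldB_eq_goA (pvTokens params) []).1
  simp only [pvFinB] at h
  simp [h]
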